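-- pv_equiv track=rewrite | github.com/calvinator42000/AoC | 2023/14_day/1_pt/main.py | getLoad
-- ===== SOURCE A (Python) =====
-- def getLoad(grid):
--     grid = rotateGrid90(grid)
--     load = 0
--     for row in grid:
--         rock_num = 0
--         for i in range(len(row)):
--             if row[i] == '#':
--                 load += sum(range(i+1-rock_num, i+1))
--                 rock_num = 0
--             elif row[i] == 'O':
--                 rock_num += 1
--         load += sum(range(len(row)+1-rock_num, len(row)+1))
--     return load
--
-- def rotateGrid90(grid):
--     rev_grid = list(reversed(grid))
--     inv_grid = list(zip(*rev_grid))
--     return inv_grid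
-- ===== SOURCE B (Python) =====
-- def getLoad(grid):
--     n = len(grid)
--     ncols = min((len(row) for row in grid), default=0)
--     load = 0
--     for c in range(ncols):
--         free = 0
--         for r, row in enumerate(grid):
--             ch = row[c]
--             if ch == '#':
--                 free = r + 1
--             elif ch == 'O':
--                 load += n - free
--                 free += 1
--     return load
-- ===== Notes on version B (the rewrite author's own statement) =====
-- stated objective: simpler
-- what changed: B drops the rotate-90 transposition and the sum(range(...)) arithmetic entirely: it scans each column of the original grid top-to-bottom once, keeping a settling pointer 'free' and adding n-free per rock.
import Mathlib
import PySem

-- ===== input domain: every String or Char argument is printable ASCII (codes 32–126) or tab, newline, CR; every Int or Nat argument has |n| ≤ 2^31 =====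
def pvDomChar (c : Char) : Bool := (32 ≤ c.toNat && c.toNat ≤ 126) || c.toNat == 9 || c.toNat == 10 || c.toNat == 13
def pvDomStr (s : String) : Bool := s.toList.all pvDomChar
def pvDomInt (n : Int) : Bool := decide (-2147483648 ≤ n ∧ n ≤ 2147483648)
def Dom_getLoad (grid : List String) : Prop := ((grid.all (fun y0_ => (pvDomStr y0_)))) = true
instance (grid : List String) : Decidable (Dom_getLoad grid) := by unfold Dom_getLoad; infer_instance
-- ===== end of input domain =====

-- B drops A's rotate-90 transposition and the sum(range(..)) arithmetic: it scans each column
-- of the original grid top-to-bottom once with a settling pointer (objective: simpler; same cost).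

-- ===== PORT A =====
-- sum(range(a, b))
def pySumRange (a b : Int) : Int := (PySem.List.pyRange a b 1).sum

-- list(zip(*ls)): exact denotation of zip — rows truncated to the shortest input length
def zipStar (ls : List (List Char)) : List (List Char) :=
  match ls with
  | [] => []
  | l :: rest =>
    (List.range (rest.foldl (fun m r => min m r.length) l.length)).map
      (fun j => (l :: rest).map (fun r => r.getD j ' '))

def rotateGrid90 (grid : List String) : List (List Char) :=
  zipStar ((grid.reverse).map String.toList)

def getLoad (grid : List String) : Int :=
  (rotateGrid90 grid).foldl
    (fun load row =>
      let p := (List.range row.length).foldl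
        (fun (st : Int × Int) (i : Nat) =>
          if row.getD i ' ' = '#' then (st.1 + pySumRange ((i : Int) + 1 - st.2) ((i : Int) + 1), 0)
          else if row.getD i ' ' = 'O' then (st.1, st.2 + 1)
          else st) (load, 0)
      p.1 + pySumRange ((row.length : Int) + 1 - p.2) ((row.length : Int) + 1)) 0

-- ===== PORT B =====
def getLoad_alt (grid : List String) : Int :=
  let n : Int := grid.length
  let ncols : Nat := match grid with
    | [] => 0
    | r :: rs => rs.foldl (fun m s => min m s.toList.length) r.toList.length
  (List.range ncols).foldl
    (fun load c =>
      ((PySem.List.enumerate grid 0).foldl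
        (fun (st : Int × Int) rr =>
          let ch := rr.2.toList.getD c ' '
          if ch = '#' then (st.1, rr.1 + 1)
          else if ch = 'O' then (st.1 + (n - st.2), st.2 + 1)
          else st) (load, 0)).1) 0

-- ===== PRECONDITION & SPEC =====
def Spec_getLoad (grid : List String) (out : Int) : Prop := out = getLoad_alt grid
instance (grid : List String) (out : Int) : Decidable (Spec_getLoad grid out) := by unfold Spec_getLoad; infer_instance

-- ===== CLAIM (what is proved, stated in full; the proofs are below) =====
def Claim_equal_getLoad : Prop := ∀ (grid : List String), Dom_getLoad grid → Spec_getLoad grid (getLoad grid)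

-- ===== LEMMAS AND PROOFS =====

-- A's inner loop (over a rotated row = a column read bottom-to-top), index carried explicitly
def amid : List Char → Nat → Int × Int → Int × Int
  | [], _, st => st
  | x :: s, k, (l, rk) =>
    if x = '#' then amid s (k + 1) (l + pySumRange ((k : Int) + 1 - rk) ((k : Int) + 1), 0)
    else if x = 'O' then amid s (k + 1) (l, rk + 1)
    else amid s (k + 1) (l, rk)

-- B's inner loop (over a column read top-to-bottom)
def bcol (n : Int) : List Char → Int → Int → Int → Int
  | [], _, load, _ => load
  | x :: t, r, load, free =>
    if x = '#' then bcol n t (r + 1) load (r + 1)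
    else if x = 'O' then bcol n t (r + 1) (load + (n - free)) (free + 1)
    else bcol n t (r + 1) load free

-- A's per-row total (loop plus the final settle), starting load 0
def totalA (s : List Char) : Int :=
  (amid s 0 (0, 0)).1 +
    pySumRange ((s.length : Int) + 1 - (amid s 0 (0, 0)).2) ((s.length : Int) + 1)

-- min of a length list as both ports fold it (head is the start value)
def minL : List Nat → Nat
  | [] => 0
  | x :: xs => xs.foldl min x

lemma pySumRange_nil {a b : Int} (h : b ≤ a) : pySumRange a b = 0 := by
  simp [pySumRange, PySem.List.pyRange_one_eq_nil h]

lemma pySumRange_succ {a b : Int} (h : a ≤ b) : pySumRange a (b + 1) = pySumRange a b + b := by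
  simp [pySumRange, PySem.List.pyRange_one_succ_right h]

lemma pySumRange_congr {a a' b b' : Int} (ha : a = a') (hb : b = b') :
    pySumRange a b = pySumRange a' b' := by rw [ha, hb]

lemma foldl_min_comm (xs : List Nat) : ∀ a b : Nat, min (xs.foldl min a) b = xs.foldl min (min a b) := by
  induction xs with
  | nil => intro a b; rfl
  | cons y xs ih =>
    intro a b
    simp only [List.foldl_cons]
    rw [ih (min a y) b]
    congr 1
    omega

lemma foldl_min_reverse (xs : List Nat) : ∀ a : Nat, xs.reverse.foldl min a = xs.foldl min a := by
  induction xs with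
  | nil => intro a; rfl
  | cons y xs ih =>
    intro a
    simp only [List.reverse_cons, List.foldl_append, List.foldl_cons, List.foldl_nil]
    rw [ih a, foldl_min_comm]

lemma minL_append_singleton (l : List Nat) (y : Nat) : minL (l ++ [y]) = minL (y :: l) := by
  cases l with
  | nil => rfl
  | cons a l' =>
    simp only [minL, List.cons_append, List.foldl_cons, List.foldl_append, List.foldl_nil]
    rw [foldl_min_comm]
    congr 1
    omega

lemma minL_reverse (l : List Nat) : minL l.reverse = minL l := by
  cases l with
  | nil => rfl
  | cons x xs =>
    rw [List.reverse_cons, minL_append_singleton]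
    simp only [minL]
    exact foldl_min_reverse xs x

-- amid: the load component is an additive accumulator
lemma amid_lin (s : List Char) : ∀ (k : Nat) (l d rk : Int),
    amid s k (l + d, rk) = ((amid s k (l, rk)).1 + d, (amid s k (l, rk)).2) := by
  induction s with
  | nil => intro k l d rk; rfl
  | cons x s ih =>
    intro k l d rk
    simp only [amid]
    split_ifs with h1 h2
    · rw [show l + d + pySumRange ((k:Int)+1-rk) ((k:Int)+1)
           = (l + pySumRange ((k:Int)+1-rk) ((k:Int)+1)) + d by ring, ih]
    · exact ih _ _ _ _
    · exact ih _ _ _ _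

-- amid over a wall-free segment only counts rocks
lemma amid_free (s : List Char) (hs : '#' ∉ s) : ∀ (k : Nat) (l rk : Int),
    amid s k (l, rk) = (l, rk + (s.countP (· == 'O') : Int)) := by
  induction s with
  | nil => intro k l rk; simp [amid]
  | cons x s ih =>
    intro k l rk
    have hx : x ≠ '#' := fun h => hs (h ▸ List.mem_cons_self ..)
    have hs' : '#' ∉ s := fun h => hs (List.mem_cons_of_mem _ h)
    simp only [amid, if_neg hx]
    by_cases hO : x = 'O'
    · rw [if_pos hO, ih hs', List.countP_cons]
      simp only [hO]
      norm_num
      ring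
    · rw [if_neg hO, ih hs', List.countP_cons]
      simp [hO]

lemma amid_append (u v : List Char) : ∀ (k : Nat) (st : Int × Int),
    amid (u ++ v) k st = amid v (k + u.length) (amid u k st) := by
  induction u with
  | nil => intro k st; simp [amid]
  | cons x u ih =>
    intro k st
    obtain ⟨l, rk⟩ := st
    simp only [List.cons_append, amid, List.length_cons]
    split_ifs with h1 h2 <;> rw [ih] <;> congr 1 <;> omega

-- rewriting all three loop parameters of bcol at once
lemma bcol_congr {n : Int} {t : List Char} {r1 r2 l1 l2 f1 f2 : Int}
    (hr : r1 = r2) (hl : l1 = l2) (hf : f1 = f2) : bcol n t r1 l1 f1 = bcol n t r2 l2 f2 := by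
  rw [hr, hl, hf]

-- bcol: the load parameter is an additive accumulator
lemma bcol_lin (n : Int) (t : List Char) : ∀ (r load d free : Int),
    bcol n t r (load + d) free = bcol n t r load free + d := by
  induction t with
  | nil => intro r load d free; rfl
  | cons x t ih =>
    intro r load d free
    simp only [bcol]
    split_ifs with h1 h2
    · exact ih _ _ _ _
    · rw [show load + d + (n - free) = (load + (n - free)) + d by ring, ih]
    · exact ih _ _ _ _

-- bcol is invariant under a common shift of n, r and free
lemma bcol_shift (t : List Char) : ∀ (n r load free d : Int),
    bcol (n + d) t (r + d) load (free + d) = bcol n t r load free := by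
  induction t with
  | nil => intro n r load free d; rfl
  | cons x t ih =>
    intro n r load free d
    simp only [bcol]
    split_ifs with h1 h2
    · rw [show r + d + 1 = (r + 1) + d by ring]
      rw [show (r + 1 : Int) + d = (r + 1) + d by ring]
      exact ih n (r+1) load (r+1) d
    · rw [show n + d - (free + d) = n - free by ring,
          show r + d + 1 = (r + 1) + d by ring,
          show free + d + 1 = (free + 1) + d by ring]
      exact ih n (r+1) (load + (n - free)) (free+1) d
    · rw [show r + d + 1 = (r + 1) + d by ring]
      exact ih n (r+1) load free d

-- bcol over a wall-free prefix: the k rocks settle at loads n-free, n-free-1, …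
lemma bcol_free (p : List Char) (hp : '#' ∉ p) : ∀ (rest : List Char) (n r load free : Int),
    bcol n (p ++ rest) r load free =
      bcol n rest (r + p.length)
        (load + pySumRange (n - free - (p.countP (· == 'O') : Int) + 1) (n - free + 1))
        (free + (p.countP (· == 'O') : Int)) := by
  induction p with
  | nil =>
    intro rest n r load free
    simp [pySumRange_nil (le_refl (n - free + 1))]
  | cons x p ih =>
    intro rest n r load free
    have hx : x ≠ '#' := fun h => hp (h ▸ List.mem_cons_self ..)
    have hp' : '#' ∉ p := fun h => hp (List.mem_cons_of_mem _ h)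
    simp only [List.cons_append, bcol, if_neg hx, List.length_cons, List.countP_cons]
    by_cases hO : x = 'O'
    · rw [if_pos hO, ih hp']
      simp only [hO]
      norm_num
      have hk : (0:Int) ≤ (p.countP (· == 'O') : Int) := Int.natCast_nonneg _
      apply bcol_congr
      · ring
      · rw [pySumRange_congr
              (show n - (free + 1) - (p.countP (· == 'O') : Int) + 1
                = n - free - ((p.countP (· == 'O') : Int) + 1) + 1 by ring)
              (show n - (free + 1) + 1 = n - free by ring)]
        have hsucc := pySumRange_succ
          (a := n - free - ((p.countP (· == 'O') : Int) + 1) + 1) (b := n - free) (by omega)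
        linarith [hsucc]
      · omega
    · rw [if_neg hO, ih hp']
      have hOb : (x == 'O') = false := by simp [hO]
      apply bcol_congr
      · push_cast; ring
      · rw [hOb]; simp
      · rw [hOb]; simp

-- head of dropWhile fails the predicate
lemma dropWhile_head_false {p : Char → Bool} :
    ∀ (t : List Char) (y : Char) (q : List Char), t.dropWhile p = y :: q → p y = false := by
  intro t
  induction t with
  | nil => intro y q h; simp [List.dropWhile] at h
  | cons x t ih =>
    intro y q h
    by_cases hx : p x
    · rw [List.dropWhile_cons, if_pos hx] at h
      exact ih y q h
    · rw [List.dropWhile_cons, if_neg hx] at h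
      cases h
      simpa using hx

-- countP of a reverse
lemma countP_reverse' (s : List Char) (p : Char → Bool) : s.reverse.countP p = s.countP p := by
  simp [List.countP_eq_length_filter, List.filter_reverse]

-- shift + load extraction combined, in the exact shape the main lemma meets
lemma bcol_shift' (q : List Char) (n d L : Int) (hn : n = (q.length : Int) + d) :
    bcol n q d L d = bcol (q.length : Int) q 0 0 0 + L := by
  subst hn
  calc bcol ((q.length : Int) + d) q d L d
      = bcol ((q.length : Int) + d) q (0 + d) (0 + L) (0 + d) := by norm_num
    _ = bcol (q.length : Int) q 0 (0 + L) 0 := bcol_shift q _ 0 (0 + L) 0 d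
    _ = bcol (q.length : Int) q 0 0 0 + L := bcol_lin _ q 0 0 L 0

-- one wall-terminated segment: free prefix + '#' collapses to the shorter column's problem
lemma bcol_wall (p q : List Char) (hp : '#' ∉ p) (n : Int)
    (hn : n = (q.length : Int) + ((p.length : Int) + 1)) :
    bcol n (p ++ '#' :: q) 0 0 0
      = bcol (q.length : Int) q 0 0 0
        + pySumRange (n - (p.countP (· == 'O') : Int) + 1) (n + 1) := by
  rw [bcol_free p hp ('#' :: q) n 0 0 0]
  simp only [bcol, if_true]
  have e1 : (0:Int) + (p.length : Int) + 1 = (p.length : Int) + 1 := by ring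
  have e2 : (0:Int) + pySumRange (n - 0 - (p.countP (· == 'O') : Int) + 1) (n - 0 + 1)
      = pySumRange (n - (p.countP (· == 'O') : Int) + 1) (n + 1) := by
    rw [zero_add]
    exact pySumRange_congr (by ring) (by ring)
  rw [e1, e2, bcol_shift' q n ((p.length : Int) + 1) _ hn]

-- bridge: A's port inner fold over range(len(row)) is amid
lemma a_bridge (row : List Char) : ∀ (s : List Char) (k : Nat) (st : Int × Int), row.drop k = s →
    (List.range' k s.length).foldl
      (fun (st : Int × Int) (i : Nat) =>
        if row.getD i ' ' = '#' then (st.1 + pySumRange ((i : Int) + 1 - st.2) ((i : Int) + 1), 0)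
        else if row.getD i ' ' = 'O' then (st.1, st.2 + 1)
        else st) st = amid s k st := by
  intro s
  induction s with
  | nil => intro k st h; simp [amid]
  | cons x s ih =>
    intro k st h
    have hx : row.getD k ' ' = x := by
      have h0 : row[k]? = some x := by
        have h1 : (List.drop k row)[0]? = row[k + 0]? := List.getElem?_drop
        rw [h] at h1
        simpa using h1.symm
      simp [List.getD_eq_getElem?_getD, h0]
    have h' : row.drop (k + 1) = s := by
      rw [← List.tail_drop, h]
      rfl
    obtain ⟨l, rk⟩ := st
    simp only [List.length_cons, List.range'_succ, List.foldl_cons, hx, amid]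
    split_ifs with h1 h2
    · exact ih _ _ h'
    · exact ih _ _ h'
    · exact ih _ _ h'

-- bridge: B's port inner fold over enumerate(grid) is bcol on the extracted column
lemma b_bridge (c : Nat) (n : Int) : ∀ (g : List String) (k load free : Int),
    ((PySem.List.enumerate g k).foldl
      (fun (st : Int × Int) rr =>
        let ch := rr.2.toList.getD c ' '
        if ch = '#' then (st.1, rr.1 + 1)
        else if ch = 'O' then (st.1 + (n - st.2), st.2 + 1)
        else st) (load, free)).1
    = bcol n (g.map (fun s => s.toList.getD c ' ')) k load free := by
  intro g
  induction g with
  | nil => intro k load free; simp [PySem.List.enumerate_nil, bcol]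
  | cons s g ih =>
    intro k load free
    rw [PySem.List.enumerate_cons]
    simp only [List.foldl_cons, List.map_cons, bcol]
    split_ifs with h1 h2
    · exact ih _ _ _
    · exact ih _ _ _
    · exact ih _ _ _


-- main per-column identity: A's bottom-to-top pass with range sums equals
-- B's top-to-bottom pass with the settling pointer
lemma main_col : ∀ (N : Nat) (t : List Char), t.length ≤ N →
    totalA t.reverse = bcol (t.length : Int) t 0 0 0 := by
  intro N
  induction N with
  | zero =>
    intro t ht
    have h0 : t = [] := List.eq_nil_of_length_eq_zero (Nat.le_zero.mp ht)
    subst h0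
    simp [totalA, amid, bcol, pySumRange_nil (le_refl (1:Int))]
  | succ N ih =>
    intro t ht
    have hsplit : t.takeWhile (fun x => decide (x ≠ '#')) ++ t.dropWhile (fun x => decide (x ≠ '#')) = t :=
      List.takeWhile_append_dropWhile ..
    set p := t.takeWhile (fun x => decide (x ≠ '#')) with hpdef
    set rest := t.dropWhile (fun x => decide (x ≠ '#')) with hrestdef
    have hpfree : '#' ∉ p := by
      intro hm
      have := List.mem_takeWhile_imp hm
      simp at this
    have hpfree' : '#' ∉ p.reverse := by simpa using hpfree
    have hK := countP_reverse' p (· == 'O')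
    cases hre : rest with
    | nil =>
      have hteq : t = p := by rw [← hsplit, hre, List.append_nil]
      rw [hteq]
      -- A side
      have hA : amid p.reverse 0 (0, 0) = (0, (p.countP (· == 'O') : Int)) := by
        rw [amid_free p.reverse hpfree' 0 0 0, hK]; norm_num
      -- B side
      have hB := bcol_free p hpfree [] ((p.length : Int)) 0 0 0
      rw [List.append_nil] at hB
      rw [totalA, hA, hB]
      simp only [bcol, List.length_reverse]
      rw [pySumRange_congr
            (show ((p.length : Int) - 0 - (p.countP (· == 'O') : Int) + 1)
              = ((p.length : Int) + 1 - (p.countP (· == 'O') : Int)) by ring)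
            (show ((p.length : Int) - 0 + 1) = ((p.length : Int) + 1) by ring)]
    | cons y q =>
      have hy : y = '#' := by
        have := dropWhile_head_false t y q (by rw [← hrestdef]; exact hre)
        simpa using this
      subst hy
      have hteq : t = p ++ '#' :: q := by rw [← hsplit, hre]
      have hlen : t.length = p.length + 1 + q.length := by rw [hteq]; simp; omega
      have hqN : q.length ≤ N := by omega
      have IH := ih q hqN
      rcases hst : amid q.reverse 0 (0, 0) with ⟨l1, rk1⟩
      have hrev : t.reverse = q.reverse ++ ('#' :: p.reverse) := by
        rw [hteq]; simp
      have hAmid : amid t.reverse 0 (0, 0)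
          = (l1 + pySumRange ((q.length : Int) + 1 - rk1) ((q.length : Int) + 1),
             (p.countP (· == 'O') : Int)) := by
        rw [hrev, amid_append, hst]
        simp only [List.length_reverse, Nat.zero_add, amid]
        rw [amid_free p.reverse hpfree' _ _ 0, hK]
        norm_num
      have hTA : totalA t.reverse
          = totalA q.reverse
            + pySumRange ((t.length : Int) + 1 - (p.countP (· == 'O') : Int))
                ((t.length : Int) + 1) := by
        rw [totalA, hAmid, totalA, hst]
        simp only [List.length_reverse]
      have hn' : (((p ++ '#' :: q).length : Int)) = (q.length : Int) + ((p.length : Int) + 1) := by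
        simp
        ring
      rw [hTA, IH, hteq]
      rw [bcol_wall p q hpfree _ hn']
      congr 1
      exact pySumRange_congr (by ring) rfl

theorem getLoad_spec : Claim_equal_getLoad := by
  intro grid _
  show getLoad grid = getLoad_alt grid
  cases grid with
  | nil => rfl
  | cons g0 gs =>
    cases hls : ((g0 :: gs).reverse.map String.toList) with
    | nil =>
      exfalso
      have h := congrArg List.length hls
      simp at h
    | cons l rest =>
      have hM : rest.foldl (fun m r => min m r.length) l.length
          = gs.foldl (fun m s => min m s.toList.length) g0.toList.length := by
        have h1 : rest.foldl (fun m r => min m r.length) l.length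
            = minL ((l :: rest).map List.length) := by
          simp [minL, List.foldl_map]
        have h2 : (l :: rest).map List.length
            = ((g0 :: gs).map (fun s => s.toList.length)).reverse := by
          rw [← hls, List.map_map, List.map_reverse]
          rfl
        rw [h1, h2, minL_reverse]
        simp [minL, List.foldl_map]
      have hrow : ∀ j : Nat, (l :: rest).map (fun r => r.getD j ' ')
          = ((g0 :: gs).map (fun s => s.toList.getD j ' ')).reverse := by
        intro j
        rw [← hls, List.map_map, List.map_reverse]
        rfl
      simp only [getLoad, getLoad_alt, rotateGrid90]
      rw [hls]
      simp only [zipStar]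
      rw [List.foldl_map, hM]
      apply PySem.List.foldl_congr_mem'
      intro j hj load
      dsimp only
      rw [hrow j, b_bridge j]
      set col := (g0 :: gs).map (fun s => s.toList.getD j ' ') with hcol
      have hcoll : col.length = gs.length + 1 := by rw [hcol]; simp
      have hA : (List.range col.reverse.length).foldl
          (fun (st : Int × Int) (i : Nat) =>
            if col.reverse.getD i ' ' = '#' then
              (st.1 + pySumRange ((i : Int) + 1 - st.2) ((i : Int) + 1), 0)
            else if col.reverse.getD i ' ' = 'O' then (st.1, st.2 + 1)
            else st) (load, 0)
          = amid col.reverse 0 (load, 0) := by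
        rw [List.range_eq_range']
        exact a_bridge col.reverse col.reverse 0 (load, 0) (by simp)
      rw [hA]
      have hlin := amid_lin col.reverse 0 0 load 0
      rw [zero_add] at hlin
      rw [hlin]
      have hmc := main_col col.length col le_rfl
      rw [totalA] at hmc
      have hlen2 : ((g0 :: gs).length : Int) = (col.length : Int) := by
        simp [hcoll]
      have hload := bcol_lin ((g0 :: gs).length : Int) col 0 0 load 0
      rw [zero_add] at hload
      rw [hload, hlen2, ← hmc]
      ring
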